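-- pv_equiv track=rewrite | github.com/aviverma007/REPORTS | backend/case_api.py | apply_case_filters
-- ===== SOURCE A (Python) =====
-- def safe_str(val):
--     if val is None:
--         return ''
--     return str(val).strip()
--
-- def apply_case_filters(rows, params):
--     filtered = rows
--     col_map = {
--         'case_type': 'Case Type',
--         'status': 'Status',
--         'case_origin': 'Case Origin',
--         'area': 'Area',
--         'sub_area': 'Sub Area',
--         'case_owner': 'Case Owner',
--         'hod': 'HOD 1',
--         'team_leader': 'Team Leader',
--         'project': 'Project',
--         'priority': 'Priority',
--         'case_applicability': 'Case Applicability',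
--         'response_time': 'Response Time Category',
--         'resolution_time': 'Resolution Time Category',
--     }
--     for key, val in params.items():
--         if val:
--             col = col_map.get(key)
--             if col:
--                 filtered = [r for r in filtered if safe_str(r.get(col)) == val]
--     return filtered
-- ===== SOURCE B (Python) =====
-- def safe_str(val):
--     if val is None:
--         return ''
--     return str(val).strip()
--
-- COL_MAP = {
--     'case_type': 'Case Type',
--     'status': 'Status',
--     'case_origin': 'Case Origin',
--     'area': 'Area',
--     'sub_area': 'Sub Area',
--     'case_owner': 'Case Owner',
--     'hod': 'HOD 1',
--     'team_leader': 'Team Leader',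
--     'project': 'Project',
--     'priority': 'Priority',
--     'case_applicability': 'Case Applicability',
--     'response_time': 'Response Time Category',
--     'resolution_time': 'Resolution Time Category',
-- }
--
-- def _row_passes(r, items):
--     # short-circuiting check of one row against all active filters
--     for key, val in items:
--         if val:
--             col = COL_MAP.get(key)
--             if col and safe_str(r.get(col)) != val:
--                 return False
--     return True
--
-- def apply_case_filters(rows, params):
--     items = list(params.items())
--     out = []
--     for r in rows:
--         if _row_passes(r, items):
--             out.append(r)
--     return out
-- ===== Notes on version B (the rewrite author's own statement) =====
-- stated objective: alternative
-- what changed: Inverts the loop nesting: instead of rebuilding the filtered list once per parameter (p passes over the data), B makes one pass over rows and decides each row with a short-circuiting per-row check over the parameters, appending kept rows to an output accumulator; it trades CPython's fast list comprehensions for a single explicit pass with early exit per row.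
import Mathlib
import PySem

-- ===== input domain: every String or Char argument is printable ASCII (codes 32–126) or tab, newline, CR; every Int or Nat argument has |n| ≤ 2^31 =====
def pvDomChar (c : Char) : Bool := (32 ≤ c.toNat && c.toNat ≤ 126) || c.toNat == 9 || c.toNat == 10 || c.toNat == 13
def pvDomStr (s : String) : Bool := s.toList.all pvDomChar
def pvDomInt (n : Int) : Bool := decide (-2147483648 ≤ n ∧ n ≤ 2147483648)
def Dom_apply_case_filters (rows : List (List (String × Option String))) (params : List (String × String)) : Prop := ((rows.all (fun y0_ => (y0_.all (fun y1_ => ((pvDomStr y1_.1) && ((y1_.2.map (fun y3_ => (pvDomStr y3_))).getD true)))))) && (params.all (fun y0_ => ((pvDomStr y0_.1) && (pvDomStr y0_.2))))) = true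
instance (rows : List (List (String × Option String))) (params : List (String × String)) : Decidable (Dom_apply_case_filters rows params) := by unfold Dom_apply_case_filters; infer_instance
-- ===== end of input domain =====

-- B inverts the loop nesting: one pass over rows with a short-circuiting per-row check over
-- the parameters, instead of re-filtering the whole list once per parameter (objective: simpler).

-- ===== PORT A =====
-- shared module helper safe_str (identical in Source A and Source B); input is the Optional[str] cell value
def pvSafeStr (val : Option String) : String :=
  match val with
  | none => ""
  | some s => PySem.Str.strip s

-- the col_map literal (identical in both sources)
def pvColMap : PySem.Dict String String :=
  PySem.Dict.ofList [("case_type", "Case Type"), ("status", "Status"),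
    ("case_origin", "Case Origin"), ("area", "Area"), ("sub_area", "Sub Area"),
    ("case_owner", "Case Owner"), ("hod", "HOD 1"), ("team_leader", "Team Leader"),
    ("project", "Project"), ("priority", "Priority"),
    ("case_applicability", "Case Applicability"),
    ("response_time", "Response Time Category"),
    ("resolution_time", "Resolution Time Category")]

-- r.get(col): missing key and stored None both give Python None -> pvSafeStr "" 
def pvCell (r : List (String × Option String)) (col : String) : Option String :=
  ((PySem.Dict.mk r).get? col).join

def apply_case_filters (rows : List (List (String × Option String))) (params : List (String × String)) : List (List (String × Option String)) :=
  params.foldl (fun filtered kv =>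
    if kv.2 ≠ "" then
      match pvColMap.get? kv.1 with
      | some col => filtered.filter (fun r => pvSafeStr (pvCell r col) == kv.2)
      | none => filtered
    else filtered) rows

-- ===== PORT B =====
-- _row_passes: short-circuiting recursion over the parameter items
def pvRowPasses (r : List (String × Option String)) : List (String × String) → Bool
  | [] => true
  | kv :: ps =>
    if kv.2 ≠ "" then
      match pvColMap.get? kv.1 with
      | some col =>
        if pvSafeStr (pvCell r col) ≠ kv.2 then false else pvRowPasses r ps
      | none => pvRowPasses r ps
    else pvRowPasses r ps

-- the row loop with its output accumulator (built back-to-front by structural recursion)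
def apply_case_filters_alt (rows : List (List (String × Option String))) (params : List (String × String)) : List (List (String × Option String)) :=
  match rows with
  | [] => []
  | r :: rs =>
    if pvRowPasses r params then r :: apply_case_filters_alt rs params
    else apply_case_filters_alt rs params

-- ===== PRECONDITION & SPEC =====
def Spec_apply_case_filters (rows : List (List (String × Option String))) (params : List (String × String)) (out : List (List (String × Option String))) : Prop := out = apply_case_filters_alt rows params
instance (rows : List (List (String × Option String))) (params : List (String × String)) (out : List (List (String × Option String))) : Decidable (Spec_apply_case_filters rows params out) := by unfold Spec_apply_case_filters; infer_instance

-- ===== CLAIM =====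
def Claim_equal_apply_case_filters : Prop := ∀ (rows : List (List (String × Option String))) (params : List (String × String)), Dom_apply_case_filters rows params → Spec_apply_case_filters rows params (apply_case_filters rows params)

-- ===== LEMMAS AND PROOFS =====

theorem alt_eq_filter (rows : List (List (String × Option String))) (params : List (String × String)) :
    apply_case_filters_alt rows params = rows.filter (fun r => pvRowPasses r params) := by
  induction rows with
  | nil => rfl
  | cons r rs ih =>
    simp only [apply_case_filters_alt, ih, List.filter_cons]

theorem foldl_eq_filter_passes (params : List (String × String)) (rows : List (List (String × Option String))) :
    params.foldl (fun filtered kv =>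
      if kv.2 ≠ "" then
        match pvColMap.get? kv.1 with
        | some col => filtered.filter (fun r => pvSafeStr (pvCell r col) == kv.2)
        | none => filtered
      else filtered) rows
    = rows.filter (fun r => pvRowPasses r params) := by
  induction params generalizing rows with
  | nil => simp [pvRowPasses]
  | cons kv ps ih =>
    by_cases hv : kv.2 ≠ ""
    · cases hc : pvColMap.get? kv.1 with
      | none =>
        simp only [List.foldl_cons, if_pos hv]
        rw [hc, ih]
        apply List.filter_congr
        intro r _
        simp [pvRowPasses, hv, hc]
      | some col =>
        simp only [List.foldl_cons, if_pos hv]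
        rw [hc, ih, List.filter_filter]
        apply List.filter_congr
        intro r _
        by_cases he : pvSafeStr (pvCell r col) = kv.2 <;>
          simp [pvRowPasses, hv, hc, he]
    · simp only [ne_eq, not_not] at hv
      simp only [List.foldl_cons, hv]
      rw [ih]
      apply List.filter_congr
      intro r _
      simp [pvRowPasses, hv]

-- ===== VERDICT =====
theorem apply_case_filters_spec : Claim_equal_apply_case_filters := by
  intro rows params _
  unfold Spec_apply_case_filters apply_case_filters
  rw [alt_eq_filter]
  exact foldl_eq_filter_passes params rows
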